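-- pv_equiv track=rewrite | github.com/shubhamdey01/UG-Codes | Sem-6/Fuzzy Logic/folMaxima.py | maxima
-- ===== SOURCE A (Python) =====
-- def maxima(s):
-- 	x = {}
-- 	for i in range(len(s)):
-- 		for j in s[i].keys():
-- 			if j in x.keys():
-- 				x[j] = max(x[j], s[i][j])
-- 			else:
-- 				x[j] = s[i][j]
-- 	res = []
-- 	for i in x.keys():
-- 		if x[i] == max(x.values()):
-- 			res.append(i)
-- 	return min(res), max(res)
-- ===== SOURCE B (Python) =====
-- def maxima(s):
--     x = {}
--     for d in s:
--         for k, v in d.items():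
--             if k in x:
--                 x[k] = max(x[k], v)
--             else:
--                 x[k] = v
--     groups = {}
--     for k, v in x.items():
--         groups.setdefault(v, []).append(k)
--     m = max(groups)
--     g = groups[m]
--     return min(g), max(g)
-- ===== Notes on version B (the rewrite author's own statement) =====
-- stated objective: faster
-- what changed: After aggregating per-key maxima, B builds an inverse index (value -> list of keys) once and reads off the keys of the maximal value, instead of A's loop that recomputes max(x.values()) for every key.
import Mathlib
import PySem

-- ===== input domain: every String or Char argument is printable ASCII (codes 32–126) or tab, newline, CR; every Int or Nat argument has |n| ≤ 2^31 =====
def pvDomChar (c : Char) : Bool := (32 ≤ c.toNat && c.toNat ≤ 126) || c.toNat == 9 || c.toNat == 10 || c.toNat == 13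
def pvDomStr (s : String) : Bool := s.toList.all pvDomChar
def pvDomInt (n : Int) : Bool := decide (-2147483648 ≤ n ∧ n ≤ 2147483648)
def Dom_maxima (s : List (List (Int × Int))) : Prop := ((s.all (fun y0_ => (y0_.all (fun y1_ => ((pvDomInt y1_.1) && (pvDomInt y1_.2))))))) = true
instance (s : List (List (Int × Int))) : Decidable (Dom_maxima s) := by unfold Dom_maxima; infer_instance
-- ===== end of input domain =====

-- B replaces A's per-key rescan of max(x.values()) with a one-pass inverse index (value -> keys); return value only.


-- ===== PORT A =====
def maxima (s : List (List (Int × Int))) : Int × Int :=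
  let x := (PySem.List.pyRange 0 (s.length : Int) 1).foldl (fun x i =>
      let si := PySem.Dict.ofList (PySem.List.pyGetD s i [])
      si.keys.foldl (fun x j =>
        if x.contains j then x.insert j (max (x.getD j 0) (si.getD j 0))
        else x.insert j (si.getD j 0)) x)
    PySem.Dict.empty
  let res := x.keys.foldl (fun res i =>
      if x.getD i 0 = (PySem.List.max? x.values (fun v => v)).getD 0 then res ++ [i] else res) []
  ((PySem.List.min? res (fun v => v)).getD 0, (PySem.List.max? res (fun v => v)).getD 0)

-- ===== PORT B =====
def maxima_alt (s : List (List (Int × Int))) : Int × Int :=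
  let x := s.foldl (fun x d =>
      (PySem.Dict.ofList d).items.foldl (fun x kv =>
        if x.contains kv.1 then x.insert kv.1 (max (x.getD kv.1 0) kv.2)
        else x.insert kv.1 kv.2) x)
    PySem.Dict.empty
  let groups := x.items.foldl (fun g kv => g.modify kv.2 [] (· ++ [kv.1])) PySem.Dict.empty
  let m := (PySem.List.max? groups.keys (fun v => v)).getD 0
  let g := groups.getD m []
  ((PySem.List.min? g (fun v => v)).getD 0, (PySem.List.max? g (fun v => v)).getD 0)

-- ===== PRECONDITION & SPEC =====
-- Pre_ excludes inputs where every inner dict is empty: there Python A raises ValueError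
-- (min()/max() of an empty sequence) and Python B raises ValueError too (max() of an empty dict).
def Pre_maxima (s : List (List (Int × Int))) : Prop := ∃ d ∈ s, d ≠ []
instance (s : List (List (Int × Int))) : Decidable (Pre_maxima s) := by unfold Pre_maxima; infer_instance
def pvWitness_maxima : (List (List (Int × Int))) := [[(1, 2)]]
def Spec_maxima (s : List (List (Int × Int))) (out : Int × Int) : Prop := out = maxima_alt s
instance (s : List (List (Int × Int))) (out : Int × Int) : Decidable (Spec_maxima s out) := by unfold Spec_maxima; infer_instance

-- ===== CLAIM (what is proved, stated in full; the proofs are below) =====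
def Claim_equal_maxima : Prop := ∀ (s : List (List (Int × Int))), Dom_maxima s → Pre_maxima s → Spec_maxima s (maxima s)

-- ===== LEMMAS AND PROOFS =====

-- the aggregation step shared by both ports, in B's form
def pvF : PySem.Dict Int Int → List (Int × Int) → PySem.Dict Int Int := fun x d =>
  (PySem.Dict.ofList d).items.foldl (fun x kv =>
    if x.contains kv.1 then x.insert kv.1 (max (x.getD kv.1 0) kv.2)
    else x.insert kv.1 kv.2) x

theorem pvF_inner_eq : (fun (x : PySem.Dict Int Int) (kv : Int × Int) =>
    if x.contains kv.1 then x.insert kv.1 (max (x.getD kv.1 0) kv.2)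
    else x.insert kv.1 kv.2)
  = (fun x kv => x.insert kv.1 (if x.contains kv.1 then max (x.getD kv.1 0) kv.2 else kv.2)) := by
  funext x kv; by_cases h : x.contains kv.1 <;> simp [h]

theorem keys_pvF (x : PySem.Dict Int Int) (d : List (Int × Int)) :
    (pvF x d).keys = PySem.Set.update x.keys ((PySem.Dict.ofList d).items.map (fun kv : Int × Int => kv.1)) := by
  unfold pvF; rw [pvF_inner_eq]
  exact PySem.Dict.keys_foldl_insert_key _ (fun kv : Int × Int => kv.1) _ x

theorem nodup_keys_pvF (x : PySem.Dict Int Int) (d : List (Int × Int)) (h : x.keys.Nodup) :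
    (pvF x d).keys.Nodup := by
  unfold pvF; rw [pvF_inner_eq]
  exact PySem.Dict.nodup_keys_foldl_insert_key _ (fun kv : Int × Int => kv.1) _ x h

theorem keys_ofList_mem (d : List (Int × Int)) (k : Int) :
    k ∈ (PySem.Dict.ofList d).keys ↔ k ∈ d.map (fun kv : Int × Int => kv.1) := by
  show k ∈ (List.foldl (fun acc p => acc.insert p.1 p.2) PySem.Dict.empty d).keys ↔ _
  rw [PySem.Dict.keys_foldl_insert_key d (fun p : Int × Int => p.1) (fun _ p => p.2) PySem.Dict.empty]
  rw [PySem.Set.mem_update]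
  simp [PySem.Dict.keys, PySem.Dict.empty]

def pvX (s : List (List (Int × Int))) : PySem.Dict Int Int := s.foldl pvF PySem.Dict.empty

theorem nodup_keys_build : ∀ (l : List (List (Int × Int))) (x : PySem.Dict Int Int),
    x.keys.Nodup → (l.foldl pvF x).keys.Nodup := by
  intro l
  induction l with
  | nil => intro x h; exact h
  | cons d t ih => intro x h; exact ih (pvF x d) (nodup_keys_pvF x d h)

theorem mem_keys_build : ∀ (l : List (List (Int × Int))) (x : PySem.Dict Int Int) (k : Int),
    k ∈ (l.foldl pvF x).keys ↔ k ∈ x.keys ∨ ∃ d ∈ l, k ∈ (PySem.Dict.ofList d).keys := by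
  intro l
  induction l with
  | nil => simp
  | cons d t ih =>
    intro x k
    simp only [List.foldl_cons, ih, keys_pvF, PySem.Set.mem_update]
    constructor
    · rintro (⟨h | h⟩ | h)
      · exact Or.inl h
      · exact Or.inr ⟨d, by simp, h⟩
      · rcases h with ⟨e, he, hk⟩; exact Or.inr ⟨e, by simp [he], hk⟩
    · rintro (h | ⟨e, he, hk⟩)
      · exact Or.inl (Or.inl h)
      · rcases List.mem_cons.mp he with rfl | he'
        · exact Or.inl (Or.inr hk)
        · exact Or.inr ⟨e, he', hk⟩

theorem pvX_eq_A (s : List (List (Int × Int))) :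
    (PySem.List.pyRange 0 (s.length : Int) 1).foldl (fun x i =>
      let si := PySem.Dict.ofList (PySem.List.pyGetD s i [])
      si.keys.foldl (fun x j =>
        if x.contains j then x.insert j (max (x.getD j 0) (si.getD j 0))
        else x.insert j (si.getD j 0)) x)
      PySem.Dict.empty = pvX s := by
  have h := PySem.List.foldl_pyRange_pyGetD' s []
    (fun x d => (PySem.Dict.ofList d).keys.foldl (fun x j =>
        if x.contains j then x.insert j (max (x.getD j 0) ((PySem.Dict.ofList d).getD j 0))
        else x.insert j ((PySem.Dict.ofList d).getD j 0)) x)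
    PySem.Dict.empty (le_refl 0)
  simp only [Int.toNat_zero, List.drop_zero] at h
  refine h.trans ?_
  apply PySem.List.foldl_congr_mem
  intro x d _
  show (PySem.Dict.ofList d).keys.foldl _ x = pvF x d
  unfold pvF
  simp only [PySem.Dict.keys, List.foldl_map]
  apply PySem.List.foldl_congr_mem
  intro acc kv hkv
  have hget : (PySem.Dict.ofList d).getD kv.1 0 = kv.2 :=
    PySem.Dict.getD_of_mem_items _ (by simpa using hkv) (PySem.Dict.nodup_keys_ofList d) 0
  rw [hget]

theorem getD_groups (X : PySem.Dict Int Int) (c : Int) :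
    (X.items.foldl (fun g kv => g.modify kv.2 [] (· ++ [kv.1])) PySem.Dict.empty).getD c []
    = (X.items.filter (fun kv => kv.2 == c)).map (fun kv : Int × Int => kv.1) := by
  have h := PySem.Dict.getD_foldl_modify_append
    (X.items.map (fun kv : Int × Int => (kv.2, kv.1))) PySem.Dict.empty c
  rw [List.foldl_map] at h
  simpa [List.filter_map, Function.comp] using h

theorem keys_groups (X : PySem.Dict Int Int) :
    (X.items.foldl (fun g kv => g.modify kv.2 [] (· ++ [kv.1])) PySem.Dict.empty).keys
    = PySem.Set.ofList X.values := by
  have h := PySem.Dict.keys_foldl_modify_key X.items (fun kv : Int × Int => kv.2)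
    ([] : List Int) (fun _ kv => (· ++ [kv.1])) PySem.Dict.empty
  simpa [PySem.Dict.values, PySem.Set.update_nil_left] using h

theorem res_eq (X : PySem.Dict Int Int) (hnd : X.keys.Nodup) (hne : X.keys ≠ []) :
    X.keys.foldl (fun res i =>
      if X.getD i 0 = (PySem.List.max? X.values (fun v => v)).getD 0 then res ++ [i] else res) []
    = (X.items.foldl (fun g kv => g.modify kv.2 [] (· ++ [kv.1])) PySem.Dict.empty).getD
        ((PySem.List.max? (X.items.foldl (fun g kv => g.modify kv.2 [] (· ++ [kv.1])) PySem.Dict.empty).keys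
          (fun v => v)).getD 0) [] := by
  have hvals : X.values ≠ [] := by
    simp only [PySem.Dict.keys, ne_eq, List.map_eq_nil_iff] at hne
    simpa [PySem.Dict.values, List.map_eq_nil_iff] using hne
  obtain ⟨M0, hM0⟩ : ∃ M0, PySem.List.max? X.values (fun v => v) = some M0 := by
    cases hc : PySem.List.max? X.values (fun v => v) with
    | none => exact absurd ((PySem.List.max?_eq_none_iff _ _).mp hc) hvals
    | some m => exact ⟨m, rfl⟩
  have hofne : PySem.Set.ofList X.values ≠ [] := by
    intro hnil
    rcases List.exists_mem_of_ne_nil _ hvals with ⟨v, hv⟩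
    have : v ∈ PySem.Set.ofList X.values := (PySem.Set.mem_ofList _ _).mpr hv
    simp [hnil] at this
  obtain ⟨m0, hm0⟩ : ∃ m0, PySem.List.max? (PySem.Set.ofList X.values) (fun v => v) = some m0 := by
    cases hc : PySem.List.max? (PySem.Set.ofList X.values) (fun v => v) with
    | none => exact absurd ((PySem.List.max?_eq_none_iff _ _).mp hc) hofne
    | some m => exact ⟨m, rfl⟩
  have hm0M0 : m0 = M0 := by
    apply le_antisymm
    · exact PySem.List.max?_isMax hM0 m0 ((PySem.Set.mem_ofList _ _).mp (PySem.List.max?_mem hm0))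
    · exact PySem.List.max?_isMax hm0 M0 ((PySem.Set.mem_ofList _ _).mpr (PySem.List.max?_mem hM0))
  rw [keys_groups, getD_groups, hm0, hM0, hm0M0]
  simp only [Option.getD_some]
  refine (PySem.List.foldl_append_ite_eq_filter (fun i => X.getD i 0 = M0) X.keys []).trans ?_
  simp only [List.nil_append, PySem.Dict.keys, List.filter_map]
  congr 1
  apply List.filter_congr
  intro kv hkv
  have hg : X.getD kv.1 0 = kv.2 := PySem.Dict.getD_of_mem_items X (by simpa using hkv) hnd 0
  simp only [Function.comp, hg]
  rfl

theorem nodup_keys_pvX (s : List (List (Int × Int))) : (pvX s).keys.Nodup :=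
  nodup_keys_build s PySem.Dict.empty PySem.Dict.nodup_keys_empty

theorem keys_pvX_ne_nil (s : List (List (Int × Int))) (h : Pre_maxima s) :
    (pvX s).keys ≠ [] := by
  rcases h with ⟨d, hd, hdne⟩
  obtain ⟨⟨k, v⟩, hkv⟩ := List.exists_mem_of_ne_nil d hdne
  have hk : k ∈ (PySem.Dict.ofList d).keys :=
    (keys_ofList_mem d k).mpr (List.mem_map.mpr ⟨(k, v), hkv, rfl⟩)
  have hmem : k ∈ (pvX s).keys := (mem_keys_build s PySem.Dict.empty k).mpr (Or.inr ⟨d, hd, hk⟩)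
  intro hnil
  rw [hnil] at hmem
  exact absurd hmem (List.not_mem_nil)

theorem maxima_spec' (s : List (List (Int × Int))) (h : Pre_maxima s) :
    maxima s = maxima_alt s := by
  unfold maxima maxima_alt
  rw [pvX_eq_A s]
  rw [show (s.foldl (fun x d =>
      (PySem.Dict.ofList d).items.foldl (fun x kv =>
        if x.contains kv.1 then x.insert kv.1 (max (x.getD kv.1 0) kv.2)
        else x.insert kv.1 kv.2) x) PySem.Dict.empty) = pvX s from rfl]
  exact congrArg
    (fun r => ((PySem.List.min? r (fun v => v)).getD 0, (PySem.List.max? r (fun v => v)).getD 0))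
    (res_eq (pvX s) (nodup_keys_pvX s) (keys_pvX_ne_nil s h))

-- ===== VERDICT (by name: the statement is the Claim_ definition above) =====
theorem maxima_spec : Claim_equal_maxima := by
  intro s _ hpre
  unfold Spec_maxima
  exact maxima_spec' s hpre
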